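-- pv_equiv track=rewrite | github.com/chikoungoun/Scraping | Pharmacies de garde/Casablanca/Server Side/Phone Comparison Version/A_Scraper.py | telephone_pharmacie
-- ===== SOURCE A (Python) =====
-- def telephone_pharmacie(adress):
--     #renverser la chaine de caractères
--     adress[::-1]
--
--     #extraire le téléphone inversé
--     ntel = ''
--     for i in adress[::-1]:
--         if i == ':':
--             break
--         elif i.isnumeric():#uniquement ajouter les nombres
--             ntel = ntel + i
--         else:
--             continue
--
--     #remettre le num de tel à l'endroit
--     tel = ''
--     for i in ntel[::-1]:
--         tel = tel + i
--
--     return tel.strip()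
-- ===== SOURCE B (Python) =====
-- def telephone_pharmacie(adress):
--     # Single forward pass: keep the characters seen since the last ':' (reset on
--     # each ':'), then keep only the digits.  No reversal, no break.
--     tail = []
--     for c in adress:
--         if c == ':':
--             tail = []
--         else:
--             tail.append(c)
--     return ''.join(c for c in tail if c.isdigit())
-- ===== Notes on version B (the rewrite author's own statement) =====
-- stated objective: simpler
-- what changed: Replaces A's reverse scan with break, reverse-rebuilding second loop and final strip by one forward pass that resets its buffer at each colon, followed by a digit filter.
import Mathlib
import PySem

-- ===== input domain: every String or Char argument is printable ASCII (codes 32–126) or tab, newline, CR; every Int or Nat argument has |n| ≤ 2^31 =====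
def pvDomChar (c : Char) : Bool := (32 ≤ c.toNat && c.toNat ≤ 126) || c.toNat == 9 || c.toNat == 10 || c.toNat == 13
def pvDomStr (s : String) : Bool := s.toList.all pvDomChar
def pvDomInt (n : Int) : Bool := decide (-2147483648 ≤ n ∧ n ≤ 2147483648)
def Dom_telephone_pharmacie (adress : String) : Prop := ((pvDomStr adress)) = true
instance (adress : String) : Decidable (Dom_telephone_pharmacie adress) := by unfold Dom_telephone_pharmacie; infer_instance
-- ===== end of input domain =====

-- B replaces A's reverse-scan-with-break plus re-reversing loop by one forward pass (simpler); same O(n) cost.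

-- ===== PORT A =====
-- the first loop of A: scan the reversed string, break at ':', collect numeric chars
-- (adress[::-1] iterated with break; '.isnumeric()' coincides with isdigit on the printable-ASCII domain)
def pvLoopA : List Char → List Char → List Char
  | [], ntel => ntel
  | c :: rest, ntel =>
    if c = ':' then ntel
    else if PySem.Chars.isdigit c then pvLoopA rest (ntel ++ [c])
    else pvLoopA rest ntel

def telephone_pharmacie (adress : String) : String :=
  let ntel := pvLoopA adress.toList.reverse []
  let tel := ntel.reverse.foldl (fun t i => t ++ [i]) []
  String.mk (PySem.Chars.strip tel)

-- ===== PORT B =====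
def telephone_pharmacie_alt (adress : String) : String :=
  let tail := adress.toList.foldl (fun acc c => if c = ':' then [] else acc ++ [c]) []
  String.mk (tail.filter (fun c => PySem.Chars.isdigit c))

-- ===== PRECONDITION & SPEC =====
def Spec_telephone_pharmacie (adress : String) (out : String) : Prop := out = telephone_pharmacie_alt adress
instance (adress : String) (out : String) : Decidable (Spec_telephone_pharmacie adress out) := by unfold Spec_telephone_pharmacie; infer_instance

-- ===== CLAIM (what is proved, stated in full; the proofs are below) =====
def Claim_equal_telephone_pharmacie : Prop := ∀ (adress : String), Dom_telephone_pharmacie adress → Spec_telephone_pharmacie adress (telephone_pharmacie adress)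

-- ===== LEMMAS AND PROOFS =====

-- A's break-loop collects the digits of the prefix up to ':'
theorem pvLoopA_eq (l acc : List Char) :
    pvLoopA l acc = acc ++ (l.takeWhile (· ≠ ':')).filter PySem.Chars.isdigit := by
  induction l generalizing acc with
  | nil => simp [pvLoopA]
  | cons c rest ih =>
    by_cases hc : c = ':'
    · simp [pvLoopA, hc]
    · by_cases hd : PySem.Chars.isdigit c
      · simp [pvLoopA, hc, hd, ih]
      · simp [pvLoopA, hc, hd, ih]

-- B's reset-fold keeps the segment after the last ':' = reversed takeWhile of the reversed string
theorem pvFoldB_eq (l acc : List Char) (hacc : (':' : Char) ∉ acc) :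
    l.foldl (fun acc c => if c = ':' then [] else acc ++ [c]) acc
      = ((l.reverse ++ acc.reverse).takeWhile (· ≠ ':')).reverse := by
  induction l generalizing acc with
  | nil =>
    simp
    rw [List.takeWhile_eq_self_iff.mpr]
    · simp
    · intro c hc
      simp only [List.mem_reverse] at hc
      simp
      exact fun h => hacc (h ▸ hc)
  | cons c rest ih =>
    by_cases hc : c = ':'
    · subst hc
      rw [List.foldl_cons, if_pos rfl, ih [] (by simp)]
      simp only [List.reverse_cons, List.reverse_nil, List.append_nil, List.append_assoc]
      congr 1
      rw [List.takeWhile_append]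
      split_ifs with hlen
      · rw [(List.takeWhile_prefix _).eq_of_length hlen]
        simp
      · rfl
    · simp only [List.foldl_cons, if_neg hc]
      rw [ih (acc ++ [c]) (by simp; exact ⟨hacc, fun h => hc h.symm⟩)]
      simp [List.append_assoc]

theorem pvNotSpace (c : Char) (h : PySem.Chars.isdigit c = true) : PySem.Chars.isspace c = false := by
  simp [PySem.Chars.isdigit, Char.le_def, UInt32.le_iff_toNat_le, Char.toNat_val] at h
  simp [PySem.Chars.isspace]
  omega

theorem strip_of_digits (l : List Char) (h : ∀ c ∈ l, PySem.Chars.isdigit c = true) :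
    PySem.Chars.strip l = l := by
  have h1 : l.dropWhile PySem.Chars.isspace = l :=
    List.dropWhile_eq_self_iff.mpr (by cases l with
      | nil => simp
      | cons a t => simp [pvNotSpace a (h a (by simp))])
  have h2 : l.reverse.dropWhile PySem.Chars.isspace = l.reverse :=
    List.dropWhile_eq_self_iff.mpr (by cases hl : l.reverse with
      | nil => simp
      | cons a t => simp [pvNotSpace a (h a (by rw [← List.mem_reverse, hl]; simp))])
  simp [PySem.Chars.strip, PySem.Chars.lstrip, PySem.Chars.rstrip, h1, h2]

-- ===== VERDICT (by name: the statement is the Claim_ definition above) =====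
theorem telephone_pharmacie_spec : Claim_equal_telephone_pharmacie := by
  intro adress _
  unfold Spec_telephone_pharmacie telephone_pharmacie telephone_pharmacie_alt
  rw [pvLoopA_eq, pvFoldB_eq _ _ (by simp)]
  simp only [List.nil_append, PySem.List.foldl_append_singleton]
  rw [strip_of_digits _ (by
    intro c hc
    simp only [List.mem_reverse, List.mem_filter] at hc
    exact hc.2)]
  simp [List.filter_reverse]
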